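-- pv_equiv track=rewrite | github.com/HKFamador/CS13a_AutomataTheory_FormalLanguage_LAB | Lab1/lab1_no1.py | dfa1
-- ===== SOURCE A (Python) =====
-- def dfa1(string):
--     # States: a (start), b, 1 (final)
--     state = 'a'
--     for ch in string:
--         if state == 'a':
--             if ch == '0':
--                 state = 'a'
--             elif ch == '1':
--                 state = 'b'
--             else:
--                 return None
--         elif state == 'b':
--             if ch == '0':
--                 state = '1'
--             elif ch == '1':
--                 state = 'a'
--             else:
--                 return None
--         elif state == '1':
--             if ch == '0':
--                 state = 'b'
--             elif ch == '1':
--                 state = '1'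
--             else:
--                 return None
--     return state == '1'
-- ===== SOURCE B (Python) =====
-- def dfa1(string):
--     # The language is {binary strings w : value(w) % 3 == 2}.  Use the
--     # alternating-digit test for mod 3 (2 == -1 mod 3): scan the string
--     # RIGHT-TO-LEFT adding digits with alternating signs, then reduce once.
--     sign = 1
--     total = 0
--     for ch in reversed(string):
--         if ch == '1':
--             total += sign
--         elif ch != '0':
--             return None
--         sign = -sign
--     return total % 3 == 2
-- ===== Notes on version B (the rewrite author's own statement) =====
-- stated objective: alternative
-- what changed: Replaces the left-to-right 3-state DFA simulation by a right-to-left alternating-sign digit sum (2 = -1 mod 3), reducing mod 3 only once at the end instead of tracking a state per step.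
import Mathlib
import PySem

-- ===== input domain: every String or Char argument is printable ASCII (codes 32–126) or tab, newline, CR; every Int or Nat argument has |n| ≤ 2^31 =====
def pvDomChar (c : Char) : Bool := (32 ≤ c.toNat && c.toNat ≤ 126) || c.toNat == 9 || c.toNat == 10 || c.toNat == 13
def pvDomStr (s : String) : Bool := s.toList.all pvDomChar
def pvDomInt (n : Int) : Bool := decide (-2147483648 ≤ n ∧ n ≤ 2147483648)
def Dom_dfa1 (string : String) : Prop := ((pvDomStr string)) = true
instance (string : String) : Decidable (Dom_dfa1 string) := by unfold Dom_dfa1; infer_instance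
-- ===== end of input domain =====

-- B replaces A's left-to-right 3-state DFA simulation by a right-to-left alternating-sign digit sum (2 = -1 mod 3), reducing mod 3 once at the end; objective: alternative.


-- ===== PORT A =====
-- literal port of A's loop: state is the Python state string's (single) character
def dfa1Loop : Char → List Char → Option Bool
  | st, [] => some (st == '1')
  | st, ch :: rest =>
    if st == 'a' then
      if ch == '0' then dfa1Loop 'a' rest
      else if ch == '1' then dfa1Loop 'b' rest
      else none
    else if st == 'b' then
      if ch == '0' then dfa1Loop '1' rest
      else if ch == '1' then dfa1Loop 'a' rest
      else none
    else if st == '1' then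
      if ch == '0' then dfa1Loop 'b' rest
      else if ch == '1' then dfa1Loop '1' rest
      else none
    else dfa1Loop st rest   -- Python: no branch matches, loop continues unchanged (unreachable from 'a')

def dfa1 (string : String) : Option Bool := dfa1Loop 'a' string.toList

-- ===== PORT B =====
-- literal port of B's loop over reversed(string): sign alternates, total accumulates signed digits
def dfa1AltLoop : Int → Int → List Char → Option Bool
  | _, total, [] => some (PySem.Int.mod total 3 == 2)
  | sign, total, ch :: rest =>
    if ch == '1' then dfa1AltLoop (-sign) (total + sign) rest
    else if ch == '0' then dfa1AltLoop (-sign) total rest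
    else none

def dfa1_alt (string : String) : Option Bool := dfa1AltLoop 1 0 string.toList.reverse

-- ===== PRECONDITION & SPEC =====
def Spec_dfa1 (string : String) (out : Option Bool) : Prop := out = dfa1_alt string
instance (string : String) (out : Option Bool) : Decidable (Spec_dfa1 string out) := by unfold Spec_dfa1; infer_instance

-- ===== CLAIM (what is proved, stated in full; the proofs are below) =====
def Claim_equal_dfa1 : Prop := ∀ (string : String), Dom_dfa1 string → Spec_dfa1 string (dfa1 string)

-- ===== LEMMAS AND PROOFS =====
-- proof-side vocabulary: the digit value of a char, the binary value of a prefix,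
-- the alternating-sign sum, validity of the alphabet, and A's closed form cf
def bitv (c : Char) : Int := if c == '1' then 1 else 0
def valFrom (v : Int) (l : List Char) : Int := l.foldl (fun v c => 2 * v + bitv c) v
def asum : List Char → Int
  | [] => 0
  | c :: r => bitv c - asum r
def validB (l : List Char) : Bool := l.all (fun c => c == '0' || c == '1')
def cf (v : Int) (l : List Char) : Option Bool :=
  if validB l then some (PySem.Int.mod (valFrom v l) 3 == 2) else none

theorem cf_cons_ok (v : Int) (r : List Char) (c : Char) (h : c = '0' ∨ c = '1') :
    cf v (c :: r) = cf (2 * v + bitv c) r := by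
  rcases h with h | h <;> subst h <;> simp [cf, validB, valFrom]

theorem valFrom_mod (l : List Char) : ∀ v v' : Int, v % 3 = v' % 3 →
    PySem.Int.mod (valFrom v l) 3 = PySem.Int.mod (valFrom v' l) 3 := by
  induction l with
  | nil =>
    intro v v' h
    simp only [valFrom, List.foldl_nil,
      PySem.Int.mod_eq_emod_of_pos (by norm_num : (0:Int) < 3), h]
  | cons c r ih =>
    intro v v' h
    simp only [valFrom, List.foldl_cons] at *
    exact ih _ _ (by omega)

theorem cf_mod (r : List Char) (v v' : Int) (h : v % 3 = v' % 3) : cf v r = cf v' r := by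
  unfold cf
  rw [valFrom_mod r v v' h]

-- B's loop computes the alternating-sign sum (closed form)
theorem altLoop_char (l : List Char) : ∀ s t,
    dfa1AltLoop s t l =
      if validB l then some (PySem.Int.mod (t + s * asum l) 3 == 2) else none := by
  induction l with
  | nil => intro s t; simp [dfa1AltLoop, validB, asum]
  | cons c r ih =>
    intro s t
    by_cases h1 : c = '1'
    · subst h1
      have ha : t + s * asum ('1' :: r) = (t + s) + (-s) * asum r := by
        simp [asum, bitv]; try ring_nf
      rw [show dfa1AltLoop s t ('1' :: r) = dfa1AltLoop (-s) (t + s) r from rfl, ih, ha]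
      simp [validB]
    · by_cases h0 : c = '0'
      · subst h0
        have ha : t + s * asum ('0' :: r) = t + (-s) * asum r := by
          simp [asum, bitv]; try ring_nf
        rw [show dfa1AltLoop s t ('0' :: r) = dfa1AltLoop (-s) t r from rfl, ih, ha]
        simp [validB]
      · simp [dfa1AltLoop, validB, h0, h1]

-- A's loop in closed form, for the three reachable states simultaneously
theorem dfa1Loop_char (l : List Char) :
    dfa1Loop 'a' l = cf 0 l ∧ dfa1Loop 'b' l = cf 1 l ∧ dfa1Loop '1' l = cf 2 l := by
  induction l with
  | nil => exact ⟨by decide, by decide, by decide⟩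
  | cons c r ih =>
    obtain ⟨ha, hb, hc⟩ := ih
    by_cases h0 : c = '0'
    · subst h0
      refine ⟨?_, ?_, ?_⟩
      · rw [cf_cons_ok 0 r '0' (Or.inl rfl),
          show dfa1Loop 'a' ('0' :: r) = dfa1Loop 'a' r from rfl, ha]
        exact cf_mod r _ _ (by decide)
      · rw [cf_cons_ok 1 r '0' (Or.inl rfl),
          show dfa1Loop 'b' ('0' :: r) = dfa1Loop '1' r from rfl, hc]
        exact cf_mod r _ _ (by decide)
      · rw [cf_cons_ok 2 r '0' (Or.inl rfl),
          show dfa1Loop '1' ('0' :: r) = dfa1Loop 'b' r from rfl, hb]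
        exact cf_mod r _ _ (by decide)
    · by_cases h1 : c = '1'
      · subst h1
        refine ⟨?_, ?_, ?_⟩
        · rw [cf_cons_ok 0 r '1' (Or.inr rfl),
            show dfa1Loop 'a' ('1' :: r) = dfa1Loop 'b' r from rfl, hb]
          exact cf_mod r _ _ (by decide)
        · rw [cf_cons_ok 1 r '1' (Or.inr rfl),
            show dfa1Loop 'b' ('1' :: r) = dfa1Loop 'a' r from rfl, ha]
          exact cf_mod r _ _ (by decide)
        · rw [cf_cons_ok 2 r '1' (Or.inr rfl),
            show dfa1Loop '1' ('1' :: r) = dfa1Loop '1' r from rfl, hc]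
          exact cf_mod r _ _ (by decide)
      · refine ⟨?_, ?_, ?_⟩ <;> simp [dfa1Loop, cf, validB, h0, h1]

-- the alternating-sign sum of the reversed string agrees with the binary value mod 3
theorem asum_rev (l : List Char) :
    PySem.Int.mod (asum l.reverse) 3 = PySem.Int.mod (valFrom 0 l) 3 := by
  induction l using List.reverseRecOn with
  | nil => rfl
  | append_singleton l c ih =>
    rw [List.reverse_append]
    simp only [List.reverse_cons, List.reverse_nil, List.nil_append, List.singleton_append, asum]
    have hv : valFrom 0 (l ++ [c]) = 2 * valFrom 0 l + bitv c := by
      simp [valFrom, List.foldl_append]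
    rw [hv]
    simp only [PySem.Int.mod_eq_emod_of_pos (by norm_num : (0:Int) < 3)] at ih ⊢
    omega

-- ===== VERDICT (by name: the statement is the Claim_ definition above) =====
theorem dfa1_spec : Claim_equal_dfa1 := by
  intro s _
  unfold Spec_dfa1 dfa1 dfa1_alt
  rw [(dfa1Loop_char s.toList).1, altLoop_char]
  have h := asum_rev s.toList
  simp only [PySem.Int.mod_eq_emod_of_pos (by norm_num : (0:Int) < 3)] at h
  simp [List.all_reverse, validB, cf, h]
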